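-- pv_equiv track=rewrite | github.com/btrif/Python_dev_repo | Project EULER/pb229 Four Representations using Squares.py | prods
-- ===== SOURCE A (Python) =====
-- def prods(xs, bound, cum=1, ind=-1):
--     yield cum
--     for nextInd in range(ind+1, len(xs)):
--         nextCum = cum * xs[nextInd]
--         if nextCum <= bound:
--             for sol in prods(xs, bound, cum*xs[nextInd], nextInd):
--                 yield sol
--         else:
--             break
-- ===== SOURCE B (Python) =====
-- def prods(xs, bound, cum=1, ind=-1):
--     stack = [(cum, ind)]
--     while stack:
--         c, i = stack.pop()
--         yield c
--         children = []
--         for j in range(i + 1, len(xs)):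
--             nc = c * xs[j]
--             if nc <= bound:
--                 children.append((nc, j))
--             else:
--                 break
--         stack.extend(reversed(children))
-- ===== Notes on version B (the rewrite author's own statement) =====
-- stated objective: alternative
-- what changed: Replaces the recursive generator DFS with an iterative loop over an explicit stack of (cum, index) frames: each popped frame is yielded, its in-bound children are collected with the same break-on-overflow rule, and pushed reversed so the pre-order stream is reproduced without recursion.
import Mathlib
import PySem

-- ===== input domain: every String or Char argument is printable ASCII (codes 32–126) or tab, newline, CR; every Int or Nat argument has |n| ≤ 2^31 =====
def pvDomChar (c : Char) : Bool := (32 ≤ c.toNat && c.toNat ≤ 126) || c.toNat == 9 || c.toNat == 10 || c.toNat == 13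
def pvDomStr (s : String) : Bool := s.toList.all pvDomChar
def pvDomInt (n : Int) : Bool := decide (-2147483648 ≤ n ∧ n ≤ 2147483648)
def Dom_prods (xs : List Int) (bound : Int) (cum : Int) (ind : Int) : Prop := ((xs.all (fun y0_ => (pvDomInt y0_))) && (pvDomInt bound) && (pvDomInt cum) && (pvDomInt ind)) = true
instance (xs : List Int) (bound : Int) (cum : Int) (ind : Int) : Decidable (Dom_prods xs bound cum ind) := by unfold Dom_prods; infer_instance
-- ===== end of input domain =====

-- B replaces A's recursive generator by an iterative explicit-stack DFS producing the same pre-order stream (objective: alternative decomposition; equivalence is about the yielded sequence, collected as a list).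

-- ===== PORT A =====
-- A is a recursive generator: yield cum, then for nextInd in range(ind+1, len(xs)), recurse on
-- cum*xs[nextInd] while it is <= bound, breaking on the first overflow.  The for-loop over
-- nextInd = j, j+1, … is prodsGo, with the recursive generator call inlined as its own
-- 'yield nextCum' (the cons) followed by its for-loop starting at j+1; the Nat argument is exact
-- fuel (len-j).toNat, a pure totality guard that hits 0 exactly when the range is exhausted.
-- Python negative indices are exact via pyGet?; the .getD 0 default is only reached outside
-- Pre_prods, where Python raises IndexError.
def prodsGo (xs : List Int) (bound : Int) : Nat → Int → Int → List Int
  | 0, _, _ => []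
  | n + 1, cum, j =>
    if j < (xs.length : Int) then
      let nextCum := cum * ((PySem.List.pyGet? xs j).getD 0)
      if nextCum ≤ bound then
        (nextCum :: prodsGo xs bound n nextCum (j + 1)) ++ prodsGo xs bound n cum (j + 1)
      else []
    else []

def prods (xs : List Int) (bound : Int) (cum : Int) (ind : Int) : List Int :=
  cum :: prodsGo xs bound ((xs.length : Int) - (ind + 1)).toNat cum (ind + 1)

-- ===== PORT B =====
-- Source B's inner for-loop: collect (nc, j) children while nc <= bound, break on the first
-- overflow.  Same exact-fuel totality guard.
def childFrames (xs : List Int) (bound : Int) : Nat → Int → Int → List (Int × Int)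
  | 0, _, _ => []
  | n + 1, c, j =>
    if j < (xs.length : Int) then
      let nc := c * ((PySem.List.pyGet? xs j).getD 0)
      if nc ≤ bound then (nc, j) :: childFrames xs bound n c (j + 1) else []
    else []

-- termination potential of a stack frame: strictly more than any multiset of child frames can carry
def framePot (xs : List Int) (p : Int × Int) : Nat := 2 ^ ((xs.length : Int) - (p.2 + 1)).toNat

def stackFuel (xs : List Int) (stack : List (Int × Int)) : Nat := (stack.map (framePot xs)).sum

-- Source B's while-loop.  The Python stack pops from the END and extends with reversed(children);
-- here the stack is kept top-first (head = top), so that step is exactly `children ++ rest`.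
-- The Nat argument is fuel; stackFuel bounds the number of iterations, so the 0 case is never
-- reached from prods_alt.
def stackRun (xs : List Int) (bound : Int) : Nat → List (Int × Int) → List Int
  | 0, _ => []
  | _ + 1, [] => []
  | n + 1, (c, i) :: rest =>
    c :: stackRun xs bound n
      (childFrames xs bound ((xs.length : Int) - (i + 1)).toNat c (i + 1) ++ rest)

def prods_alt (xs : List Int) (bound : Int) (cum : Int) (ind : Int) : List Int :=
  stackRun xs bound (stackFuel xs [(cum, ind)]) [(cum, ind)]

-- ===== PRECONDITION & SPEC =====
-- Pre_ excludes exactly the inputs where A raises IndexError: ind+1 is a negative index below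
-- -len(xs) while the loop range is nonempty, so xs[ind+1] fails.
def Pre_prods (xs : List Int) (bound : Int) (cum : Int) (ind : Int) : Prop :=
  (xs.length : Int) ≤ ind + 1 ∨ -(xs.length : Int) ≤ ind + 1
instance (xs : List Int) (bound : Int) (cum : Int) (ind : Int) : Decidable (Pre_prods xs bound cum ind) := by unfold Pre_prods; infer_instance
def pvWitness_prods : List Int × Int × Int × Int := ([2, 3], 10, 1, -1)

def Spec_prods (xs : List Int) (bound : Int) (cum : Int) (ind : Int) (out : List Int) : Prop := out = prods_alt xs bound cum ind
instance (xs : List Int) (bound : Int) (cum : Int) (ind : Int) (out : List Int) : Decidable (Spec_prods xs bound cum ind out) := by unfold Spec_prods; infer_instance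

-- ===== CLAIM (what is proved, stated in full; the proofs are below) =====
def Claim_equal_prods : Prop := ∀ (xs : List Int) (bound : Int) (cum : Int) (ind : Int), Dom_prods xs bound cum ind → Pre_prods xs bound cum ind → Spec_prods xs bound cum ind (prods xs bound cum ind)

-- ===== LEMMAS AND PROOFS =====

-- a frame's children carry strictly less potential than the frame itself
theorem childFrames_pot (xs : List Int) (bound : Int) : ∀ (n : Nat) (c j : Int),
    ((xs.length : Int) - j).toNat = n →
    ((childFrames xs bound n c j).map (framePot xs)).sum + 1 ≤ 2 ^ n := by
  intro n
  induction n with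
  | zero => intro c j _; simp [childFrames]
  | succ n ih =>
    intro c j h
    have hj : j < (xs.length : Int) := by omega
    rw [childFrames]
    by_cases hb : c * ((PySem.List.pyGet? xs j).getD 0) ≤ bound
    · rw [if_pos hj, if_pos hb]
      have hrec := ih c (j + 1) (by omega)
      have hfp : framePot xs (c * ((PySem.List.pyGet? xs j).getD 0), j) = 2 ^ n := by
        simp only [framePot]
        congr 1
        omega
      simp only [List.map_cons, List.sum_cons, hfp, pow_succ]
      omega
    · rw [if_pos hj, if_neg hb]
      simpa using Nat.one_le_two_pow

-- A's for-loop equals the flattened recursive expansion of B's child frames.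
theorem loop_eq_frames (xs : List Int) (bound : Int) : ∀ (n : Nat) (c j : Int),
    ((xs.length : Int) - j).toNat = n →
    prodsGo xs bound n c j
      = ((childFrames xs bound n c j).map (fun p => prods xs bound p.1 p.2)).flatten := by
  intro n
  induction n with
  | zero => intro c j _; simp [prodsGo, childFrames]
  | succ n ih =>
    intro c j h
    have hj : j < (xs.length : Int) := by omega
    rw [prodsGo, childFrames]
    by_cases hb : c * ((PySem.List.pyGet? xs j).getD 0) ≤ bound
    · rw [if_pos hj, if_pos hb, if_pos hj, if_pos hb]
      simp only [List.map_cons, List.flatten_cons]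
      rw [← ih c (j + 1) (by omega)]
      have hne : ((xs.length : Int) - (j + 1)).toNat = n := by omega
      simp [prods, hne]
    · rw [if_pos hj, if_neg hb, if_pos hj, if_neg hb]
      simp

-- B's stack loop streams the concatenation of A's outputs over the stacked frames.
theorem stackRun_eq (xs : List Int) (bound : Int) : ∀ (n : Nat) (stack : List (Int × Int)),
    stackFuel xs stack ≤ n →
    stackRun xs bound n stack = (stack.map (fun p => prods xs bound p.1 p.2)).flatten := by
  intro n
  induction n with
  | zero =>
    intro stack h
    match stack with
    | [] => simp [stackRun]
    | (c, i) :: rest =>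
      exfalso
      have : (1:Nat) ≤ framePot xs (c, i) := Nat.one_le_two_pow
      simp only [stackFuel, List.map_cons, List.sum_cons] at h
      omega
  | succ n ih =>
    intro stack h
    match stack with
    | [] => rfl
    | (c, i) :: rest =>
      rw [stackRun]
      have hpot := childFrames_pot xs bound ((xs.length : Int) - (i + 1)).toNat c (i + 1) rfl
      simp only [stackFuel, List.map_cons, List.sum_cons, framePot] at h
      rw [ih _ (by
        simp only [stackFuel, List.map_append, List.sum_append]
        omega)]
      simp only [List.map_cons, List.flatten_cons, List.map_append, List.flatten_append]
      rw [← loop_eq_frames xs bound ((xs.length : Int) - (i + 1)).toNat c (i + 1) rfl]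
      simp [prods]

-- ===== VERDICT (by name: the statement is the Claim_ definition above) =====
theorem prods_spec : Claim_equal_prods := by
  intro xs bound cum ind _ _
  unfold Spec_prods prods_alt
  rw [stackRun_eq xs bound (stackFuel xs [(cum, ind)]) [(cum, ind)] (le_refl _)]
  simp
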